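-- pv_equiv track=rewrite | github.com/inegm/ebpython | assignments/solutions/1_dodecaphony.py | invert_tone_row
-- ===== SOURCE A (Python) =====
-- def invert_tone_row(row):
--     """Invert a tone row
--
--     :param row: a tone row
--     :row: list of midi note ints
--
--     :returns: the inverted tone row
--     :rtype: list of midi note ints
--     """
--     intervals = list()
--     for index, tone in enumerate(row):
--         try:
--             interval = row[index + 1] - tone
--             inverted = -1 * interval
--             intervals.append(inverted)
--         except IndexError:
--             continue
--     inversion = [row[0]]
--     for interval in intervals:
--         inversion.append(inversion[-1] + interval)
--
--     return inversion
-- ===== SOURCE B (Python) =====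
-- def invert_tone_row(row):
--     """Invert a tone row: inversion[k] = 2*row[0] - row[k] (closed form)."""
--     base = 2 * row[0]
--     return [base - tone for tone in row]
-- ===== Notes on version B (the rewrite author's own statement) =====
-- stated objective: simpler
-- what changed: Replaced the interval-list construction plus running-sum accumulation with the telescoped closed form inversion[k] = 2*row[0] - row[k], a single map over the row (one pass, no intermediate list).
import Mathlib
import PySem

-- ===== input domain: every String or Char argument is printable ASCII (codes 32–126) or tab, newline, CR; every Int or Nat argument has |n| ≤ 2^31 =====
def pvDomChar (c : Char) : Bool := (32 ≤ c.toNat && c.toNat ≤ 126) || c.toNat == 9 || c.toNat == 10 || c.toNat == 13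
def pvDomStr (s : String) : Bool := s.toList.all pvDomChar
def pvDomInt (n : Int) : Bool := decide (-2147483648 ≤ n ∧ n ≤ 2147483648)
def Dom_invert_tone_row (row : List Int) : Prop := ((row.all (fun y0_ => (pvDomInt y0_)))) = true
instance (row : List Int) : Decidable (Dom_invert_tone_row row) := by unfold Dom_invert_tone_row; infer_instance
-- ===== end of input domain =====

-- B replaces A's interval list + running accumulator by the closed form 2*row[0] - row[k]; objective: simpler.

-- ===== PORT A =====
-- first loop: for index, tone in enumerate(row): try interval = row[index+1]-tone … except IndexError: continue
-- second loop: inversion = [row[0]]; for interval in intervals: inversion.append(inversion[-1] + interval)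
-- (row[0] is guarded by Pre_: on the empty row Python raises IndexError, pyGetD's default 0 is never used)
def invert_tone_row (row : List Int) : List Int :=
  let intervals := (PySem.List.enumerate row 0).foldl
    (fun acc p =>
      match PySem.List.pyGet? row (p.1 + 1) with
      | some nxt => acc ++ [(-1) * (nxt - p.2)]
      | none => acc) []
  intervals.foldl
    (fun inv interval => inv ++ [PySem.List.pyGetD inv (-1) 0 + interval])
    [PySem.List.pyGetD row 0 0]

-- ===== PORT B =====
-- base = 2*row[0]; [base - tone for tone in row]  (row[0] guarded by Pre_, as above)
def invert_tone_row_alt (row : List Int) : List Int :=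
  let base := 2 * PySem.List.pyGetD row 0 0
  row.map (fun tone => base - tone)

-- ===== PRECONDITION & SPEC =====
-- A (and B) raise IndexError on the empty row (row[0]); Pre_ excludes exactly that input.
def Pre_invert_tone_row (row : List Int) : Prop := row ≠ []
instance (row : List Int) : Decidable (Pre_invert_tone_row row) := by unfold Pre_invert_tone_row; infer_instance
def pvWitness_invert_tone_row : List Int := [0, 4, 7, 11]

def Spec_invert_tone_row (row : List Int) (out : List Int) : Prop := out = invert_tone_row_alt row
instance (row : List Int) (out : List Int) : Decidable (Spec_invert_tone_row row out) := by unfold Spec_invert_tone_row; infer_instance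

-- ===== CLAIM (what is proved, stated in full; the proofs are below) =====
def Claim_equal_invert_tone_row : Prop := ∀ (row : List Int), Dom_invert_tone_row row → Pre_invert_tone_row row → Spec_invert_tone_row row (invert_tone_row row)

-- ===== LEMMAS AND PROOFS =====

-- negated successive intervals of a row (proof-side characterisation of A's first loop)
def negDiffs : List Int → List Int
  | a :: b :: t => (-1) * (b - a) :: negDiffs (b :: t)
  | _ => []

-- running sums starting from a (proof-side characterisation of A's second loop)
def partialSums (a : Int) : List Int → List Int
  | [] => []
  | i :: t => (a + i) :: partialSums (a + i) t

theorem loop1_eq (xs : List Int) : ∀ (pre acc : List Int),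
    (PySem.List.enumerate xs ((pre.length : Int))).foldl
      (fun acc p =>
        match PySem.List.pyGet? (pre ++ xs) (p.1 + 1) with
        | some nxt => acc ++ [(-1) * (nxt - p.2)]
        | none => acc) acc
    = acc ++ negDiffs xs := by
  induction xs with
  | nil => intro pre acc; simp [PySem.List.enumerate_nil, negDiffs]
  | cons x xs' ih =>
    intro pre acc
    rw [PySem.List.enumerate_cons]
    simp only [List.foldl_cons]
    have hget : PySem.List.pyGet? (pre ++ x :: xs') ((pre.length : Int) + 1) = xs'[0]? := by
      have : pre ++ x :: xs' = (pre ++ [x]) ++ xs' := by simp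
      rw [this]
      have h2 : ((pre.length : Int) + 1) = (((pre ++ [x]).length : Int) + 0) := by simp
      rw [h2]
      exact PySem.List.pyGet?_append_right (pre ++ [x]) xs' 0
    cases xs' with
    | nil =>
      simp only [hget]
      simp [PySem.List.enumerate_nil, negDiffs]
    | cons b t =>
      simp only [hget]
      have key := ih (pre ++ [x]) (acc ++ [(-1) * (b - x)])
      have hlen : ((pre ++ [x]).length : Int) = (pre.length : Int) + 1 := by simp
      have hlist : (pre ++ [x]) ++ (b :: t) = pre ++ x :: b :: t := by simp
      rw [hlen, hlist] at key
      simp only [List.getElem?_cons_zero]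
      rw [key]
      simp [negDiffs]

theorem loop2_eq (ivs : List Int) : ∀ (init : List Int) (h : init ≠ []),
    ivs.foldl (fun inv interval => inv ++ [PySem.List.pyGetD inv (-1) 0 + interval]) init
    = init ++ partialSums (init.getLast h) ivs := by
  induction ivs with
  | nil => intro init h; simp [partialSums]
  | cons i t ih =>
    intro init h
    simp only [List.foldl_cons]
    rw [PySem.List.pyGetD_neg_one init 0 h]
    have key := ih (init ++ [init.getLast h + i]) (by simp)
    rw [key]
    have : (init ++ [init.getLast h + i]).getLast (by simp) = init.getLast h + i := by
      simp
    rw [this]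
    simp [partialSums]

theorem partialSums_negDiffs (rest : List Int) : ∀ (a c : Int),
    partialSums (c - a) (negDiffs (a :: rest)) = rest.map (fun t => c - t) := by
  induction rest with
  | nil => intro a c; simp [negDiffs, partialSums]
  | cons b t ih =>
    intro a c
    simp only [negDiffs, partialSums, List.map_cons]
    have h1 : c - a + (-1) * (b - a) = c - b := by ring
    rw [h1, ih b c]

-- ===== VERDICT (by name: the statement is the Claim_ definition above) =====
theorem invert_tone_row_spec : Claim_equal_invert_tone_row := by
  intro row _ hpre
  unfold Spec_invert_tone_row invert_tone_row invert_tone_row_alt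
  cases row with
  | nil => exact absurd rfl hpre
  | cons r0 rest =>
    have h1 := loop1_eq (r0 :: rest) [] []
    simp only [List.length_nil, Int.natCast_zero, List.nil_append] at h1
    rw [h1]
    have hget0 : PySem.List.pyGetD (r0 :: rest) 0 0 = r0 := by
      simp [PySem.List.pyGetD_zero_cons]
    rw [hget0]
    have h2 := loop2_eq (negDiffs (r0 :: rest)) [r0] (by simp)
    rw [h2]
    have hlast : ([r0] : List Int).getLast (by simp) = r0 := by simp
    rw [hlast]
    have h4 := partialSums_negDiffs rest r0 (2 * r0)
    have h5 : (2 : Int) * r0 - r0 = r0 := by ring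
    rw [h5] at h4
    rw [h4]
    simp only [List.map_cons, List.singleton_append, h5]
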